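-- pv_equiv track=rewrite | github.com/optnil/SRCH | venv/Lib/site-packages/results/paging.py | generate_or_statement
-- ===== SOURCE A (Python) =====
-- def generate_or_statement(a, b, a_compared, b_compared):
--     if a and b:
--         a_first, b_first = a[0], b[0]
--         or_statement = generate_or_statement(
--             a[1:], b[1:], a_compared + [a[0]], b_compared + [b[0]]
--         )
--         equalities = [f"{x} = {y}" for x, y in zip(a_compared, b_compared)]
--         equalities_joined = " and ".join(equalities)
--         if or_statement:
--             return f"({equalities_joined} and {a_first} > {b_first}) or {or_statement}"
--         else:
--             return f"({equalities_joined} and {a_first} > {b_first})"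
-- ===== SOURCE B (Python) =====
-- def generate_or_statement(a, b, a_compared, b_compared):
--     # Iterative: precompute all equality strings once, build each OR-term from a
--     # growing prefix of them, join once (A rebuilds them and re-concatenates per level).
--     if not a or not b:
--         return None
--     E = [f"{x} = {y}" for x, y in zip(a_compared + a, b_compared + b)]
--     m = min(len(a_compared), len(b_compared))
--     terms = [f"({' and '.join(E[:m + i])} and {x} > {y})"
--              for i, (x, y) in enumerate(zip(a, b))]
--     return " or ".join(terms)
-- ===== Notes on version B (the rewrite author's own statement) =====
-- stated objective: faster
-- what changed: Replaces A's recursion (which re-derives the equality list from scratch at every level and re-concatenates the growing OR-string once per level) by one pass that precomputes all equality strings from zip(a_compared+a, b_compared+b), builds each OR-term from a prefix of them, and joins once.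
import Mathlib
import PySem

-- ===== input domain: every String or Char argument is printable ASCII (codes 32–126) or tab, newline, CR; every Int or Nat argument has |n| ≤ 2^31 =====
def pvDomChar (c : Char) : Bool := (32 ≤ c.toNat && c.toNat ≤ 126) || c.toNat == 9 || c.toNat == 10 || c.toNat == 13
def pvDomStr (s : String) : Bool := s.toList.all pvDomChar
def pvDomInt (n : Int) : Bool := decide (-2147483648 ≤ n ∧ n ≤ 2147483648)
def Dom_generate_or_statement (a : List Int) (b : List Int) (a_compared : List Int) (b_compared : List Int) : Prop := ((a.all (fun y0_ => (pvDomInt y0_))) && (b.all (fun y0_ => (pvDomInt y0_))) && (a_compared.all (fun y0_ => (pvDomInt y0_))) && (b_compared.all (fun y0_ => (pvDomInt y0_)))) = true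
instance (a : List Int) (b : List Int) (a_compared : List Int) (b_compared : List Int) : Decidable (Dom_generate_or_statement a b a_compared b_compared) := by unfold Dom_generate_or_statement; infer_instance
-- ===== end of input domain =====

-- B replaces A's recursion (which re-derives the equality list and re-concatenates the
-- accumulated OR-string at every level) by one pass that precomputes all equality strings
-- once, takes a growing prefix per term, and joins once; measured faster at large sizes.

-- ===== PORT A =====
-- A builds strings; we transliterate over List Char (Lean's String.append is kernel-opaque)
-- and wrap with String.mk at the end.  'if or_statement:' = Option is some AND nonempty string.
def goA (a : List Int) (b : List Int) (ac : List Int) (bc : List Int) : Option (List Char) :=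
  match a, b with
  | a0 :: at', b0 :: bt' =>
    let or_statement := goA at' bt' (ac ++ [a0]) (bc ++ [b0])
    let equalities := (ac.zip bc).map (fun p => PySem.Int.toChars p.1 ++ (" = ").toList ++ PySem.Int.toChars p.2)
    let ej := PySem.Chars.join ((" and ").toList) equalities
    match or_statement with
    | some s =>
      if s ≠ [] then
        some (("(").toList ++ ej ++ (" and ").toList ++ PySem.Int.toChars a0 ++ (" > ").toList ++ PySem.Int.toChars b0 ++ (") or ").toList ++ s)
      else
        some (("(").toList ++ ej ++ (" and ").toList ++ PySem.Int.toChars a0 ++ (" > ").toList ++ PySem.Int.toChars b0 ++ (")").toList)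
    | none =>
        some (("(").toList ++ ej ++ (" and ").toList ++ PySem.Int.toChars a0 ++ (" > ").toList ++ PySem.Int.toChars b0 ++ (")").toList)
  | _, _ => none

def generate_or_statement (a : List Int) (b : List Int) (a_compared : List Int) (b_compared : List Int) : Option String :=
  (goA a b a_compared b_compared).map String.ofList

-- ===== PORT B =====
-- E[:m+i] has nonnegative bounds, so the slice is List.take (m+i).
def generate_or_statement_alt (a : List Int) (b : List Int) (a_compared : List Int) (b_compared : List Int) : Option String :=
  if a = [] ∨ b = [] then none
  else
    let E := ((a_compared ++ a).zip (b_compared ++ b)).map (fun p => PySem.Int.toChars p.1 ++ (" = ").toList ++ PySem.Int.toChars p.2)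
    let m := min a_compared.length b_compared.length
    let terms := (PySem.List.enumerate (a.zip b)).map (fun p =>
      ("(").toList ++ PySem.Chars.join ((" and ").toList) (E.take (m + p.1.toNat)) ++ (" and ").toList ++ PySem.Int.toChars p.2.1 ++ (" > ").toList ++ PySem.Int.toChars p.2.2 ++ (")").toList)
    some (String.ofList (PySem.Chars.join ((" or ").toList) terms))

-- ===== PRECONDITION & SPEC =====
def Spec_generate_or_statement (a : List Int) (b : List Int) (a_compared : List Int) (b_compared : List Int) (out : Option String) : Prop := out = generate_or_statement_alt a b a_compared b_compared
instance (a : List Int) (b : List Int) (a_compared : List Int) (b_compared : List Int) (out : Option String) : Decidable (Spec_generate_or_statement a b a_compared b_compared out) := by unfold Spec_generate_or_statement; infer_instance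

-- ===== CLAIM (what is proved, stated in full; the proofs are below) =====
def Claim_equal_generate_or_statement : Prop := ∀ (a : List Int) (b : List Int) (a_compared : List Int) (b_compared : List Int), Dom_generate_or_statement a b a_compared b_compared → Spec_generate_or_statement a b a_compared b_compared (generate_or_statement a b a_compared b_compared)

-- ===== LEMMAS AND PROOFS =====

def eqC (p : Int × Int) : List Char := PySem.Int.toChars p.1 ++ (" = ").toList ++ PySem.Int.toChars p.2

def termC (es : List (List Char)) (x : Int) (y : Int) : List Char :=
  ("(").toList ++ PySem.Chars.join ((" and ").toList) es ++ (" and ").toList ++ PySem.Int.toChars x ++ (" > ").toList ++ PySem.Int.toChars y ++ (")").toList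

def termsK (E : List (List Char)) : List (Int × Int) → Nat → List (List Char)
  | [], _ => []
  | p :: ps, k => termC (E.take k) p.1 p.2 :: termsK E ps (k + 1)

theorem zip_append_take_min (ac : List Int) (bc : List Int) (a : List Int) (b : List Int) :
    ((ac ++ a).zip (bc ++ b)).take (min ac.length bc.length) = ac.zip bc := by
  induction ac generalizing bc with
  | nil => simp
  | cons x ac' ih =>
    cases bc with
    | nil => simp
    | cons y bc' => simp [Nat.succ_min_succ, ih]

theorem termsK_enum (E : List (List Char)) (ps : List (Int × Int)) (m : Nat) (s : Nat) :
    (PySem.List.enumerate ps (s : Int)).map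
        (fun p => termC (E.take (m + p.1.toNat)) p.2.1 p.2.2)
      = termsK E ps (m + s) := by
  induction ps generalizing s with
  | nil => simp [PySem.List.enumerate, termsK]
  | cons p ps ih =>
    rw [PySem.List.enumerate_cons, List.map_cons]
    have h1 : ((s : Int)).toNat = s := Int.toNat_natCast s
    have h2 : (s : Int) + 1 = ((s + 1 : Nat) : Int) := by push_cast; ring
    rw [h2, ih (s + 1)]
    simp [termsK, h1, Nat.add_assoc]

theorem join_term_cons_ne_nil (es : List (List Char)) (x y : Int) (rest : List (List Char)) :
    PySem.Chars.join ((" or ").toList) (termC es x y :: rest) ≠ [] := by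
  cases rest with
  | nil => rw [PySem.Chars.join_singleton]; simp [termC]
  | cons q r => rw [PySem.Chars.join_cons_cons]; simp [termC]

theorem paren_or_toList : (") or ").toList = (")").toList ++ (" or ").toList := by decide

theorem goA_char (a : List Int) (b : List Int) (ac : List Int) (bc : List Int) :
    goA a b ac bc =
      if a = [] ∨ b = [] then none
      else some (PySem.Chars.join ((" or ").toList)
        (termsK (((ac ++ a).zip (bc ++ b)).map eqC) (a.zip b) (min ac.length bc.length))) := by
  induction a generalizing b ac bc with
  | nil => simp [goA]
  | cons a0 at' ih =>
    cases b with
    | nil => simp [goA]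
    | cons b0 bt' =>
      rw [goA, ih bt' (ac ++ [a0]) (bc ++ [b0])]
      have hEq : (ac ++ [a0]) ++ at' = ac ++ (a0 :: at') := by simp
      have hEq' : (bc ++ [b0]) ++ bt' = bc ++ (b0 :: bt') := by simp
      have hm : min (ac ++ [a0]).length (bc ++ [b0]).length = min ac.length bc.length + 1 := by
        simp [Nat.succ_min_succ]
      set E := ((ac ++ (a0 :: at')).zip (bc ++ (b0 :: bt'))).map eqC with hE
      have hEqs : (ac.zip bc).map
          (fun p => PySem.Int.toChars p.1 ++ (" = ").toList ++ PySem.Int.toChars p.2)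
          = E.take (min ac.length bc.length) := by
        rw [hE, ← List.map_take, zip_append_take_min]
        rfl
      simp at hEqs
      rw [hEq, hEq', hm, ← hE]
      by_cases hnil : at' = [] ∨ bt' = []
      · have hz : at'.zip bt' = [] := by
          rcases hnil with h | h <;> simp [h]
        simp only [if_pos hnil]
        simp [hEqs, hz, termsK, PySem.Chars.join_singleton, termC]
      · rw [not_or] at hnil
        obtain ⟨ha, hb⟩ := hnil
        obtain ⟨a1, at'', rfl⟩ := List.exists_cons_of_ne_nil ha
        obtain ⟨b1, bt'', rfl⟩ := List.exists_cons_of_ne_nil hb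
        simp only [List.zip_cons_cons, termsK]
        simp only [reduceCtorEq, or_self, if_false]
        rw [if_pos]
        · simp only [Option.some.injEq]
          rw [PySem.Chars.join_cons_cons]
          simp [hEqs, termC, paren_or_toList, List.append_assoc]
        · simp only [ne_eq]
          exact join_term_cons_ne_nil _ a1 b1 _
theorem alt_terms (ac : List Int) (bc : List Int) (a : List Int) (b : List Int) :
    (PySem.List.enumerate (a.zip b)).map (fun p =>
        ("(").toList ++ PySem.Chars.join ((" and ").toList) (((((ac ++ a).zip (bc ++ b)).map (fun p => PySem.Int.toChars p.1 ++ (" = ").toList ++ PySem.Int.toChars p.2))).take (min ac.length bc.length + p.1.toNat)) ++ (" and ").toList ++ PySem.Int.toChars p.2.1 ++ (" > ").toList ++ PySem.Int.toChars p.2.2 ++ (")").toList)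
      = termsK (((ac ++ a).zip (bc ++ b)).map eqC) (a.zip b) (min ac.length bc.length) := by
  have h := termsK_enum (((ac ++ a).zip (bc ++ b)).map eqC) (a.zip b) (min ac.length bc.length) 0
  simp only [Nat.cast_zero, Nat.add_zero] at h
  exact h

-- ===== VERDICT (by name: the statement is the Claim_ definition above) =====
theorem generate_or_statement_spec : Claim_equal_generate_or_statement := by
  intro a b ac bc _
  unfold Spec_generate_or_statement generate_or_statement generate_or_statement_alt
  rw [goA_char]
  by_cases h : a = [] ∨ b = []
  · simp [h]
  · rw [if_neg h, if_neg h]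
    simp only [Option.map_some, Option.some.injEq]
    rw [alt_terms]
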